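-- pv_equiv track=rewrite | github.com/Githmaz/python-explore-repo | CW-1/bar_chart.py | update_result_counts
-- ===== SOURCE A (Python) =====
-- def update_result_counts(result_data):
--     result_counts = {
--         "Progress": 0,
--         "Trailer": 0,
--         "Retriever": 0,
--         "Exclude": 0
--     }
--
--     for item in result_data:
--         if "Exclude" in item:
--            result_counts["Exclude"] += 1
--         elif "Progress (Module Trailer)" in item:
--             result_counts["Trailer"] += 1
--         elif "Module Retriever" in item:
--             result_counts["Retriever"] += 1
--         elif "Progress" in item:           # "Progress" is in the last place because, not to mess up with "Progress (Module Trailer)"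
--             result_counts["Progress"] += 1
--
--     return result_counts
-- ===== SOURCE B (Python) =====
-- def update_result_counts(result_data):
--     # Four independent counting passes, one per category, with negative guards
--     # replicating the elif priority (Exclude > Trailer > Retriever > Progress).
--     exclude = sum(1 for item in result_data if "Exclude" in item)
--     trailer = sum(1 for item in result_data
--                   if "Progress (Module Trailer)" in item and "Exclude" not in item)
--     retriever = sum(1 for item in result_data
--                     if "Module Retriever" in item and "Exclude" not in item
--                     and "Progress (Module Trailer)" not in item)
--     progress = sum(1 for item in result_data
--                    if "Progress" in item and "Exclude" not in item
--                    and "Progress (Module Trailer)" not in item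
--                    and "Module Retriever" not in item)
--     return {
--         "Progress": progress,
--         "Trailer": trailer,
--         "Retriever": retriever,
--         "Exclude": exclude
--     }
-- ===== Notes on version B (the rewrite author's own statement) =====
-- stated objective: alternative
-- what changed: A builds a dict of four counters and updates one of them per item in a single elif-chain loop; B makes four independent counting passes over result_data (one count per category, each with the negative guards that encode the elif priority) and assembles the dict at the end.
import Mathlib
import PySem

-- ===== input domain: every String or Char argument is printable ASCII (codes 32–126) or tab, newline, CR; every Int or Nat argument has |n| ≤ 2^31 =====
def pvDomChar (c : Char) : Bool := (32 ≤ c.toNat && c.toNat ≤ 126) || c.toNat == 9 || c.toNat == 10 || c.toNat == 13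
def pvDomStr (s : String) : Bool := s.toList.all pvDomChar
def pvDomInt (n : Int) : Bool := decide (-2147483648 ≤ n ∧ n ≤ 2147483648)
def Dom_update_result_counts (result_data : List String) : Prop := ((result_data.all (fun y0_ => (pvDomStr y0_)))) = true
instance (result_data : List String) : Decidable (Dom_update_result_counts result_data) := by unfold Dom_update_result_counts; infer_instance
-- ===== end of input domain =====

-- B replaces A's single accumulating loop over a dict with four independent
-- counting passes (one List.countP per category); objective: alternative decomposition.

-- ===== PORT A =====
def update_result_counts (result_data : List String) : List (String × Int) :=
  (result_data.foldl (fun d item =>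
      if PySem.Str.isIn "Exclude" item then d.modify "Exclude" 0 (· + 1)
      else if PySem.Str.isIn "Progress (Module Trailer)" item then d.modify "Trailer" 0 (· + 1)
      else if PySem.Str.isIn "Module Retriever" item then d.modify "Retriever" 0 (· + 1)
      else if PySem.Str.isIn "Progress" item then d.modify "Progress" 0 (· + 1)
      else d)
    ((((PySem.Dict.empty.insert "Progress" (0 : Int)).insert "Trailer" 0).insert "Retriever" 0).insert "Exclude" 0)).items

-- ===== PORT B =====
def update_result_counts_alt (result_data : List String) : List (String × Int) :=
  [("Progress", (result_data.countP (fun item =>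
        PySem.Str.isIn "Progress" item && !PySem.Str.isIn "Exclude" item
        && !PySem.Str.isIn "Progress (Module Trailer)" item
        && !PySem.Str.isIn "Module Retriever" item) : Int)),
   ("Trailer", (result_data.countP (fun item =>
        PySem.Str.isIn "Progress (Module Trailer)" item && !PySem.Str.isIn "Exclude" item) : Int)),
   ("Retriever", (result_data.countP (fun item =>
        PySem.Str.isIn "Module Retriever" item && !PySem.Str.isIn "Exclude" item
        && !PySem.Str.isIn "Progress (Module Trailer)" item) : Int)),
   ("Exclude", (result_data.countP (fun item => PySem.Str.isIn "Exclude" item) : Int))]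

-- ===== PRECONDITION & SPEC =====
def Spec_update_result_counts (result_data : List String) (out : List (String × Int)) : Prop := out = update_result_counts_alt result_data
instance (result_data : List String) (out : List (String × Int)) : Decidable (Spec_update_result_counts result_data out) := by unfold Spec_update_result_counts; infer_instance

-- ===== CLAIM (what is proved, stated in full; the proofs are below) =====
def Claim_equal_update_result_counts : Prop := ∀ (result_data : List String), Dom_update_result_counts result_data → Spec_update_result_counts result_data (update_result_counts result_data)

-- ===== LEMMAS AND PROOFS =====
theorem update_result_counts_loop (result_data : List String) (p t r e : Int) :
    result_data.foldl (fun d item =>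
      if PySem.Str.isIn "Exclude" item then d.modify "Exclude" 0 (· + 1)
      else if PySem.Str.isIn "Progress (Module Trailer)" item then d.modify "Trailer" 0 (· + 1)
      else if PySem.Str.isIn "Module Retriever" item then d.modify "Retriever" 0 (· + 1)
      else if PySem.Str.isIn "Progress" item then d.modify "Progress" 0 (· + 1)
      else d)
    (PySem.Dict.mk [("Progress", p), ("Trailer", t), ("Retriever", r), ("Exclude", e)])
    = PySem.Dict.mk
      [("Progress", p + (result_data.countP (fun item =>
          PySem.Str.isIn "Progress" item && !PySem.Str.isIn "Exclude" item
          && !PySem.Str.isIn "Progress (Module Trailer)" item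
          && !PySem.Str.isIn "Module Retriever" item) : Int)),
       ("Trailer", t + (result_data.countP (fun item =>
          PySem.Str.isIn "Progress (Module Trailer)" item && !PySem.Str.isIn "Exclude" item) : Int)),
       ("Retriever", r + (result_data.countP (fun item =>
          PySem.Str.isIn "Module Retriever" item && !PySem.Str.isIn "Exclude" item
          && !PySem.Str.isIn "Progress (Module Trailer)" item) : Int)),
       ("Exclude", e + (result_data.countP (fun item => PySem.Str.isIn "Exclude" item) : Int))] := by
  induction result_data generalizing p t r e with
  | nil => simp
  | cons x xs ih =>
    simp only [List.foldl_cons, List.countP_cons]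
    by_cases h1 : PySem.Str.isIn "Exclude" x = true
    · rw [if_pos h1,
        show (PySem.Dict.mk [("Progress", p), ("Trailer", t), ("Retriever", r), ("Exclude", e)]).modify "Exclude" 0 (· + 1)
          = PySem.Dict.mk [("Progress", p), ("Trailer", t), ("Retriever", r), ("Exclude", e + 1)] from by
          simp [PySem.Dict.modify, PySem.Dict.getD, PySem.Dict.get?, PySem.Dict.insert],
        ih]
      simp at h1
      simp [h1]
      ring_nf
    · by_cases h2 : PySem.Str.isIn "Progress (Module Trailer)" x = true
      · rw [if_neg h1, if_pos h2,
          show (PySem.Dict.mk [("Progress", p), ("Trailer", t), ("Retriever", r), ("Exclude", e)]).modify "Trailer" 0 (· + 1)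
            = PySem.Dict.mk [("Progress", p), ("Trailer", t + 1), ("Retriever", r), ("Exclude", e)] from by
            simp [PySem.Dict.modify, PySem.Dict.getD, PySem.Dict.get?, PySem.Dict.insert],
          ih]
        simp at h1 h2
        simp [h1, h2]
        ring_nf
      · by_cases h3 : PySem.Str.isIn "Module Retriever" x = true
        · rw [if_neg h1, if_neg h2, if_pos h3,
            show (PySem.Dict.mk [("Progress", p), ("Trailer", t), ("Retriever", r), ("Exclude", e)]).modify "Retriever" 0 (· + 1)
              = PySem.Dict.mk [("Progress", p), ("Trailer", t), ("Retriever", r + 1), ("Exclude", e)] from by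
              simp [PySem.Dict.modify, PySem.Dict.getD, PySem.Dict.get?, PySem.Dict.insert],
            ih]
          simp at h1 h2 h3
          simp [h1, h2, h3]
          ring_nf
        · by_cases h4 : PySem.Str.isIn "Progress" x = true
          · rw [if_neg h1, if_neg h2, if_neg h3, if_pos h4,
              show (PySem.Dict.mk [("Progress", p), ("Trailer", t), ("Retriever", r), ("Exclude", e)]).modify "Progress" 0 (· + 1)
                = PySem.Dict.mk [("Progress", p + 1), ("Trailer", t), ("Retriever", r), ("Exclude", e)] from by
                simp [PySem.Dict.modify, PySem.Dict.getD, PySem.Dict.get?, PySem.Dict.insert],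
              ih]
            simp at h1 h2 h3 h4
            simp [h1, h2, h3, h4]
            ring_nf
          · rw [if_neg h1, if_neg h2, if_neg h3, if_neg h4, ih]
            simp at h1 h2 h3 h4
            simp [h1, h2, h3, h4]

-- ===== VERDICT (by name: the statement is the Claim_ definition above) =====
theorem update_result_counts_spec : Claim_equal_update_result_counts := by
  intro result_data _
  show _ = _
  unfold update_result_counts update_result_counts_alt
  rw [show ((((PySem.Dict.empty.insert "Progress" (0 : Int)).insert "Trailer" 0).insert "Retriever" 0).insert "Exclude" 0)
      = PySem.Dict.mk [("Progress", 0), ("Trailer", 0), ("Retriever", 0), ("Exclude", 0)] from by decide]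
  rw [update_result_counts_loop]
  simp
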